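-- pv_equiv track=rewrite | github.com/fizbin/4michael | hekatonkheire/hekascore.py | _find_max_straight_len
-- ===== SOURCE A (Python) =====
-- def _find_max_straight_len(hand, suit=None):
--     n_jokers = len([x for x in hand if x[0] == 'O'])
--     ranks = set(x[0] for x in hand
--                 if suit is None
--                 or x[1] == suit)
--
--     all_ranks = 'A23456789TJQK'
--
--     run_len = [0] * (n_jokers + 1)
--     max_run_len = 0
--
--     for rank in all_ranks * 2:
--         if rank in ranks:
--             for i in range(n_jokers + 1):
--                 run_len[i] += 1
--         else:
--             max_run_len = max(max_run_len, run_len[-1])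
--             for i in reversed(range(n_jokers)):
--                 run_len[i + 1] = run_len[i] + 1
--             run_len[0] = 0
--
--     max_run_len = min(max_run_len, len(all_ranks))
--     return max_run_len
-- ===== SOURCE B (Python) =====
-- def _find_max_straight_len(hand, suit=None):
--     n_jokers = len([x for x in hand if x[0] == 'O'])
--     ranks = set(x[0] for x in hand
--                 if suit is None
--                 or x[1] == suit)
--
--     all_ranks = 'A23456789TJQK'
--
--     gaps = [i for i, r in enumerate(all_ranks * 2) if r not in ranks]
--     w = n_jokers + 1
--     best = 0
--     for k, g in enumerate(gaps):
--         cand = g - gaps[k - w] - 1 if k >= w else g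
--         if cand > best:
--             best = cand
--     return min(best, 13)
-- ===== Notes on version B (the rewrite author's own statement) =====
-- stated objective: alternative
-- what changed: Replaces A's per-position DP over a (n_jokers+1)-entry run-length array (shifted and bumped at every rank) by building the list of gap positions in the doubled rank string once and taking a windowed difference over it: the run ending before the k-th gap spans back to just after the (k-n_jokers-1)-th gap.
import Mathlib
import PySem

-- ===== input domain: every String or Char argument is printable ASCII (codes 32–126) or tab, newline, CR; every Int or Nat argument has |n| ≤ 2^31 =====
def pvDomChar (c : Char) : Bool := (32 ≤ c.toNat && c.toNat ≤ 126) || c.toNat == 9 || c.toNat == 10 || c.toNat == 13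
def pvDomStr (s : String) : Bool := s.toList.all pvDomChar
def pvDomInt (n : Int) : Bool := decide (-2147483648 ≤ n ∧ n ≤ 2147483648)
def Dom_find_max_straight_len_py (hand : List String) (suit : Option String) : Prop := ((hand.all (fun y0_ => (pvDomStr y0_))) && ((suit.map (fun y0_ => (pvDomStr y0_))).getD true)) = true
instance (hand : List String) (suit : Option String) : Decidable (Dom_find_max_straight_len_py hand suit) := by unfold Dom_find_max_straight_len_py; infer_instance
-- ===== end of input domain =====

-- B replaces A's per-rank joker DP array by building the gap-position list once and scanning it
-- with a windowed difference (objective: alternative); return values proved equal on all of Pre_.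

-- ===== PORT A =====
-- helpers shared by both ports: both Pythons compute n_jokers / ranks / all_ranks identically.
def pvAllRanks : List Char := "A23456789TJQK".toList

def pvNJokers (hand : List String) : Nat :=
  (hand.filter (fun x => PySem.Str.pyGet? x 0 == some 'O')).length

-- ranks = set(x[0] for x in hand if suit is None or x[1] == suit); the ' ' default of
-- .getD is unreachable under Pre_ (every hand string is nonempty).
def pvRanks (hand : List String) (suit : Option String) : PySem.Set Char :=
  PySem.Set.ofList
    ((hand.filter (fun x => suit.isNone ||
        ((PySem.Str.pyGet? x 1).map (fun c => String.ofList [c]) == suit))).map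
      (fun x => (PySem.Str.pyGet? x 0).getD ' '))

-- one iteration of A's loop body over state (run_len, max_run_len); the in-place reversed
-- shift 'run_len[i+1] = run_len[i] + 1; run_len[0] = 0' is '0 :: dropLast.map (+1)',
-- and run_len[-1] is getLastD (run_len has n_jokers+1 ≥ 1 entries, so the default is unreachable).
def pvStepA (ranks : PySem.Set Char) (st : List Int × Int) (rank : Char) : List Int × Int :=
  if PySem.Set.contains ranks rank then
    (st.1.map (· + 1), st.2)
  else
    (0 :: (st.1.dropLast.map (· + 1)), max st.2 (st.1.getLastD 0))

def find_max_straight_len_py (hand : List String) (suit : Option String) : Int :=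
  let n_jokers := pvNJokers hand
  let ranks := pvRanks hand suit
  let res := (pvAllRanks ++ pvAllRanks).foldl (pvStepA ranks) (List.replicate (n_jokers + 1) (0 : Int), (0 : Int))
  min res.2 13

-- ===== PORT B =====
-- one iteration of B's loop over (k, g) in enumerate(gaps):
-- cand = g - gaps[k - w] - 1 if k >= w else g; best updated when cand > best.
def pvStepB (w : Int) (gaps : List Int) (best : Int) (p : Int × Int) : Int :=
  let cand := if p.1 ≥ w then p.2 - PySem.List.pyGetD gaps (p.1 - w) 0 - 1 else p.2
  if cand > best then cand else best

def find_max_straight_len_py_alt (hand : List String) (suit : Option String) : Int :=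
  let n_jokers := pvNJokers hand
  let ranks := pvRanks hand suit
  let gaps : List Int := (PySem.List.enumerate (pvAllRanks ++ pvAllRanks) 0).filterMap
      (fun p => if PySem.Set.contains ranks p.2 then none else some p.1)
  let w : Int := (n_jokers : Int) + 1
  let best := (PySem.List.enumerate gaps 0).foldl (pvStepB w gaps) 0
  min best 13

-- ===== PRECONDITION & SPEC =====
-- Pre_ excludes exactly the inputs where Python A raises IndexError: a hand string of
-- length 0 (x[0]), or of length 1 when a suit is given (x[1]).
def Pre_find_max_straight_len_py (hand : List String) (suit : Option String) : Prop :=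
  ∀ x ∈ hand, 1 ≤ x.toList.length ∧ (suit.isSome → 2 ≤ x.toList.length)
instance (hand : List String) (suit : Option String) : Decidable (Pre_find_max_straight_len_py hand suit) := by
  unfold Pre_find_max_straight_len_py; infer_instance

def pvWitness_find_max_straight_len_py : List String × Option String := (["AS", "OS", "3S"], some "S")

def Spec_find_max_straight_len_py (hand : List String) (suit : Option String) (out : Int) : Prop := out = find_max_straight_len_py_alt hand suit
instance (hand : List String) (suit : Option String) (out : Int) : Decidable (Spec_find_max_straight_len_py hand suit out) := by unfold Spec_find_max_straight_len_py; infer_instance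

-- ===== CLAIM (what is proved, stated in full; the proofs are below) =====
def Claim_equal_find_max_straight_len_py : Prop := ∀ (hand : List String) (suit : Option String), Dom_find_max_straight_len_py hand suit → Pre_find_max_straight_len_py hand suit → Spec_find_max_straight_len_py hand suit (find_max_straight_len_py hand suit)

-- ===== LEMMAS AND PROOFS =====

-- candidate run length ending just before a gap at position p; G = earlier gaps, most recent first
def pvCand (nj : Nat) (p : Int) (G : List Int) : Int :=
  if nj < G.length then p - G.getD nj 0 - 1 else p

-- reference recursion: scan the rank characters, keeping the running maximum over gaps
def pvSpine (nj : Nat) (mem : Char → Bool) : List Char → Int → List Int → Int → Int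
  | [], _, _, m => m
  | c :: cs, p, G, m =>
    if mem c then pvSpine nj mem cs (p + 1) G m
    else pvSpine nj mem cs (p + 1) (p :: G) (max m (pvCand nj p G))

-- the value of A's run_len array as a function of the position and the earlier gaps
def pvRL (nj : Nat) (p : Int) (G : List Int) : List Int :=
  (List.range (nj + 1)).map (fun i => if i < G.length then p - G.getD i 0 - 1 else p)

-- gap positions of the remaining characters, starting at position p
def pvGaps (mem : Char → Bool) : List Char → Int → List Int
  | [], _ => []
  | c :: cs, p => if mem c then pvGaps mem cs (p + 1) else p :: pvGaps mem cs (p + 1)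

-- reference recursion over the gap list only
def pvSpineG (nj : Nat) : List Int → List Int → Int → Int
  | [], _, m => m
  | g :: gs, G, m => pvSpineG nj gs (g :: G) (max m (pvCand nj g G))

lemma pvRL_zero (nj : Nat) : pvRL nj 0 [] = List.replicate (nj + 1) (0 : Int) := by
  simp [pvRL]

lemma pvRL_map_succ (nj : Nat) (p : Int) (G : List Int) :
    (pvRL nj p G).map (· + 1) = pvRL nj (p + 1) G := by
  simp only [pvRL, List.map_map]
  apply List.map_congr_left
  intro i hi
  by_cases h : i < G.length <;> simp [h] <;> ring

lemma pvRL_getLastD (nj : Nat) (p : Int) (G : List Int) :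
    (pvRL nj p G).getLastD 0 = pvCand nj p G := by
  simp [pvRL, pvCand, List.range_succ]

lemma pvRL_shift (nj : Nat) (p : Int) (G : List Int) :
    (0 : Int) :: ((pvRL nj p G).dropLast.map (· + 1)) = pvRL nj (p + 1) (p :: G) := by
  apply List.ext_getElem
  · simp [pvRL]
  · intro i h1 h2
    match i with
    | 0 => simp [pvRL]
    | i + 1 =>
      simp only [pvRL, List.length_cons, List.length_map, List.length_dropLast,
        List.length_range] at h1 h2 ⊢
      simp only [List.getElem_cons_succ, List.getElem_map, List.getElem_dropLast,
        List.getElem_range, List.getD_cons_succ]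
      by_cases h : i < G.length <;> simp [h] <;> omega

lemma pvFoldA (nj : Nat) (ranks : PySem.Set Char) :
    ∀ (cs : List Char) (p : Int) (G : List Int) (m : Int),
      (cs.foldl (pvStepA ranks) (pvRL nj p G, m)).2 =
        pvSpine nj (fun c => PySem.Set.contains ranks c) cs p G m := by
  intro cs
  induction cs with
  | nil => intro p G m; rfl
  | cons c cs ih =>
    intro p G m
    simp only [List.foldl_cons, pvStepA, pvSpine]
    by_cases h : PySem.Set.contains ranks c
    · simp only [h, if_true, pvRL_map_succ]; exact ih (p + 1) G m
    · simp only [h, if_false, Bool.false_eq_true, pvRL_shift, pvRL_getLastD]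
      exact ih (p + 1) (p :: G) (max m (pvCand nj p G))

lemma pvSpine_eq_spineG (nj : Nat) (mem : Char → Bool) :
    ∀ (cs : List Char) (p : Int) (G : List Int) (m : Int),
      pvSpine nj mem cs p G m = pvSpineG nj (pvGaps mem cs p) G m := by
  intro cs
  induction cs with
  | nil => intro p G m; rfl
  | cons c cs ih =>
    intro p G m
    simp only [pvSpine, pvGaps]
    by_cases h : mem c <;> simp only [h, if_true, if_false, Bool.false_eq_true, pvSpineG] <;>
      apply ih

lemma pvGaps_eq_filterMap (mem : Char → Bool) :
    ∀ (cs : List Char) (p : Int),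
      (PySem.List.enumerate cs p).filterMap
        (fun q => if mem q.2 then none else some q.1) = pvGaps mem cs p := by
  intro cs
  induction cs with
  | nil => intro p; rfl
  | cons c cs ih =>
    intro p
    rw [PySem.List.enumerate_cons]
    by_cases h : mem c <;> simp [pvGaps, h, ih (p + 1)]

lemma pvFoldB (nj : Nat) (gaps : List Int) :
    ∀ (rest G : List Int) (m : Int), gaps = G.reverse ++ rest →
      (PySem.List.enumerate rest (G.length : Int)).foldl (pvStepB ((nj : Int) + 1) gaps) m =
        pvSpineG nj rest G m := by
  intro rest
  induction rest with
  | nil => intro G m _; rfl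
  | cons g rest ih =>
    intro G m h
    rw [PySem.List.enumerate_cons, List.foldl_cons, pvSpineG]
    have hstep : pvStepB ((nj : Int) + 1) gaps m ((G.length : Int), g) = max m (pvCand nj g G) := by
      simp only [pvStepB, pvCand]
      by_cases hc : nj < G.length
      · have hge : ((G.length : Int)) ≥ (nj : Int) + 1 := by omega
        have h0 : (0 : Int) ≤ (G.length : Int) - ((nj : Int) + 1) := by omega
        have hlen : (G.length : Int) - ((nj : Int) + 1) < (gaps.length : Int) := by
          subst h; simp; omega
        rw [PySem.List.pyGetD_eq_getElem gaps 0 h0 hlen]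
        have hidx : ((G.length : Int) - ((nj : Int) + 1)).toNat = G.length - 1 - nj := by omega
        have hlt : G.length - 1 - nj < G.reverse.length := by simp; omega
        have : gaps[((G.length : Int) - ((nj : Int) + 1)).toNat]'(by omega) = G.getD nj 0 := by
          subst h
          rw [List.getElem_append_left (by simpa [hidx] using hlt)]
          rw [List.getElem_reverse]
          rw [List.getD_eq_getElem G 0 hc]
          congr 1
          simp [hidx]
          omega
        rw [this]
        rw [if_pos hge, if_pos hc]
        split_ifs <;> omega
      · have hge : ¬ ((G.length : Int) ≥ (nj : Int) + 1) := by omega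
        rw [if_neg hge, if_neg hc]
        split_ifs <;> omega
    rw [hstep]
    have hG : gaps = (g :: G).reverse ++ rest := by simp [h]
    have := ih (g :: G) (max m (pvCand nj g G)) hG
    simpa using this

-- ===== VERDICT (by name: the statement is the Claim_ definition above) =====
theorem find_max_straight_len_py_spec : Claim_equal_find_max_straight_len_py := by
  intro hand suit _ _
  unfold Spec_find_max_straight_len_py
  have hA : find_max_straight_len_py hand suit =
      min (pvSpineG (pvNJokers hand)
        (pvGaps (fun c => PySem.Set.contains (pvRanks hand suit) c) (pvAllRanks ++ pvAllRanks) 0) [] 0) 13 := by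
    show min (((pvAllRanks ++ pvAllRanks).foldl (pvStepA (pvRanks hand suit))
        (List.replicate (pvNJokers hand + 1) (0 : Int), (0 : Int))).2) 13 = _
    rw [← pvRL_zero (pvNJokers hand), pvFoldA, pvSpine_eq_spineG]
  have hB : find_max_straight_len_py_alt hand suit =
      min (pvSpineG (pvNJokers hand)
        (pvGaps (fun c => PySem.Set.contains (pvRanks hand suit) c) (pvAllRanks ++ pvAllRanks) 0) [] 0) 13 := by
    show min ((PySem.List.enumerate ((PySem.List.enumerate (pvAllRanks ++ pvAllRanks) 0).filterMap
        (fun p => if PySem.Set.contains (pvRanks hand suit) p.2 then none else some p.1)) 0).foldl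
        (pvStepB ((pvNJokers hand : Int) + 1)
          ((PySem.List.enumerate (pvAllRanks ++ pvAllRanks) 0).filterMap
            (fun p => if PySem.Set.contains (pvRanks hand suit) p.2 then none else some p.1))) 0) 13 = _
    rw [pvGaps_eq_filterMap]
    have := pvFoldB (pvNJokers hand)
      (pvGaps (fun c => PySem.Set.contains (pvRanks hand suit) c) (pvAllRanks ++ pvAllRanks) 0)
      (pvGaps (fun c => PySem.Set.contains (pvRanks hand suit) c) (pvAllRanks ++ pvAllRanks) 0)
      [] 0 rfl
    simp only [List.length_nil, Nat.cast_zero] at this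
    rw [this]
  rw [hA, hB]
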